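-- pv_equiv track=rewrite | github.com/moshekagan/personal_teaching | Netta_Ben_Gurion/preper_to_exam/moed_A_sol_3.py | play_helper
-- ===== SOURCE A (Python) =====
-- FIRST_PLAYER = 0
--
-- SECOND_PLAYER = 1
--
-- def current_row(board):
--     for i in range(len(board)):
--         if board[i] != 0:
--             return i
--     return None
--
-- def do_move(board, move):
--     res = board[:]
--     res[current_row(board)] = move
--     return res
--
-- def play_helper(board, current_player, res):
--     row = current_row(board)
--
--     if row is None:  # if row is None the board is empty
--         res[current_player] += 1
--         return res
--
--     pos_moves = board[row]
--
--     for move in range(pos_moves):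
--         new_board = do_move(board, move)
--         new_current_player = FIRST_PLAYER if current_player == SECOND_PLAYER else SECOND_PLAYER
--
--         play_helper(new_board, new_current_player, res)
--
--     return res
-- ===== SOURCE B (Python) =====
-- def play_helper(board, current_player, res):
--     # Closed-form counting: a leaf path spends, in a row of value v, a strictly
--     # decreasing chain v > a1 > ... > 0; the number of chains with an even /
--     # odd number of moves is (0,0) for v<0, (0,1) for v==1 and
--     # (2**(v-2), 2**(v-2)) for v>=2.  Rows combine by parity convolution.
--     E, O = 1, 0
--     for v in board:
--         if v == 0:
--             continue
--         if v == 1: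
--             e, o = 0, 1
--         elif v >= 2:
--             e = o = 1 << (v - 2)
--         else:
--             e, o = 0, 0
--         E, O = E * e + O * o, E * o + O * e
--     if all(v == 0 for v in board):
--         res[current_player] += 1
--     else:
--         p = 0 if current_player == 1 else 1
--         if O:
--             res[p] += O
--         if E:
--             res[1 - p] += E
--     return res
-- ===== Notes on version B (the rewrite author's own statement) =====
-- stated objective: alternative
-- what changed: Replaces the exhaustive game-tree recursion by a closed-form count: each row of value v contributes (even,odd) chain counts ((0,0) for v<0, (0,1) for v=1, (2^(v-2),2^(v-2)) for v>=2), rows are combined in one parity-convolution pass, and the two resulting counts are added to res at the two player indices.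
import Mathlib
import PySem

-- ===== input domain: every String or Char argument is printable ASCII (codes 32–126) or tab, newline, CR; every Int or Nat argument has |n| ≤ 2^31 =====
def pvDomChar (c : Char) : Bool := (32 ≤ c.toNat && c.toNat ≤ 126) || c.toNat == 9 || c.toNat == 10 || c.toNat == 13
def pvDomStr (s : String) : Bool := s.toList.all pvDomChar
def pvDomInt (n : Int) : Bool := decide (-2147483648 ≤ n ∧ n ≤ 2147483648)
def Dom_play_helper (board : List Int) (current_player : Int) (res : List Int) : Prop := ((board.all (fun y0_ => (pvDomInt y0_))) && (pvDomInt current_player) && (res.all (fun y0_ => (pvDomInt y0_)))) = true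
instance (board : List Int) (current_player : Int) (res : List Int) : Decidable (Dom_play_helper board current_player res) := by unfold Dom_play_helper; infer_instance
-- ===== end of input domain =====

-- B replaces A's exhaustive game-tree recursion by a closed-form per-row
-- even/odd chain count combined with one parity-convolution pass (alternative
-- algorithm).  A mutates `res` in place and returns it; the equivalence
-- proved here is about the RETURN value only.

-- ===== PORT A =====
-- `current_row`: first index holding a nonzero value
def currentRowA : List Int → Option Nat
  | [] => none
  | x :: xs => if x ≠ 0 then some 0 else (currentRowA xs).map (· + 1)

-- `do_move`: copy of the board with board[current_row] = move
def doMoveA (board : List Int) (move : Int) : List Int :=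
  match currentRowA board with
  | some i => board.set i move
  | none => board

-- termination measure for A's recursion
def sumNatA (l : List Int) : Nat := (l.map Int.toNat).sum

theorem currentRowA_lt {board : List Int} {row : Nat} (h : currentRowA board = some row) :
    row < board.length := by
  induction board generalizing row with
  | nil => simp [currentRowA] at h
  | cons x xs ih =>
    simp only [currentRowA] at h
    by_cases hx : x = 0
    · simp only [hx, ne_eq, not_true_eq_false, ite_false, if_neg, Option.map_eq_some_iff] at h
      obtain ⟨r, hr, hrr⟩ := h
      have := ih hr
      simp only [List.length_cons]
      omega
    · simp only [hx, ne_eq, not_false_eq_true, ite_true, if_pos, Option.some.injEq] at h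
      simp [← h]

theorem sumNatA_set_lt {board : List Int} {row : Nat} {m : Int}
    (hlt : row < board.length) (hm : 0 ≤ m) (hv : m < board.getD row 0) :
    sumNatA (board.set row m) < sumNatA board := by
  induction board generalizing row with
  | nil => simp at hlt
  | cons x xs ih =>
    cases row with
    | zero =>
      simp only [List.set_cons_zero, sumNatA, List.map_cons, List.sum_cons]
      simp only [List.getD_cons_zero] at hv
      have : m.toNat < x.toNat := by omega
      omega
    | succ r =>
      simp only [List.set_cons_succ, sumNatA, List.map_cons, List.sum_cons]
      simp only [List.length_cons] at hlt
      simp only [List.getD_cons_succ] at hv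
      have := ih (by omega) hv
      simp only [sumNatA] at this
      omega

-- `play_helper` (A): recursive game-tree walk threading `res`
def play_helper (board : List Int) (current_player : Int) (res : List Int) : List Int :=
  match h : currentRowA board with
  | none =>
      -- res[current_player] += 1  (Python index semantics; IndexError excluded by Pre_)
      PySem.List.pySetD res current_player (PySem.List.pyGetD res current_player 0 + 1)
  | some row =>
      let pos_moves := board.getD row 0
      (PySem.List.pyRange 0 pos_moves 1).attach.foldl
        (fun r mv =>
          play_helper (doMoveA board mv.1) (if current_player = 1 then 0 else 1) r) res
termination_by sumNatA board
decreasing_by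
  have hmem := (PySem.List.mem_pyRange_one).mp mv.2
  simp only [doMoveA, h]
  exact sumNatA_set_lt (currentRowA_lt h) hmem.1 hmem.2

-- ===== PORT B =====
def play_helper_alt (board : List Int) (current_player : Int) (res : List Int) : List Int :=
  let EO := board.foldl
    (fun (p : Int × Int) v =>
      if v = 0 then p
      else
        let eo : Int × Int :=
          if v = 1 then (0, 1)
          else if 2 ≤ v then ((2:Int) ^ (v - 2).toNat, (2:Int) ^ (v - 2).toNat)
          else (0, 0)
        (p.1 * eo.1 + p.2 * eo.2, p.1 * eo.2 + p.2 * eo.1)) (1, 0)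
  if board.all (fun v => v == 0) then
    PySem.List.pySetD res current_player (PySem.List.pyGetD res current_player 0 + 1)
  else
    let p : Int := if current_player = 1 then 0 else 1
    let res1 := if EO.2 ≠ 0 then PySem.List.pySetD res p (PySem.List.pyGetD res p 0 + EO.2) else res
    if EO.1 ≠ 0 then PySem.List.pySetD res1 (1 - p) (PySem.List.pyGetD res1 (1 - p) 0 + EO.1) else res1

-- ===== PRECONDITION & SPEC =====
-- Pre_ excludes exactly the inputs where Python A raises IndexError: it raises
-- iff some leaf of the game tree increments an out-of-range position of `res`;
-- which positions are hit is a closed-form function of the board's sign/1-count shape.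
def Pre_play_helper (board : List Int) (current_player : Int) (res : List Int) : Prop :=
  (∃ x ∈ board, x < 0) ∨
  ((∀ x ∈ board, 0 ≤ x) ∧
    ((∀ x ∈ board, x = 0) → -(res.length : Int) ≤ current_player ∧ current_player < res.length) ∧
    ((∃ x ∈ board, 2 ≤ x) → 2 ≤ res.length) ∧
    (((∃ x ∈ board, x = 1) ∧ ¬(∃ x ∈ board, 2 ≤ x)) →
      (if board.count 1 % 2 = 1 then (if current_player = 1 then (0 : Int) else 1)
       else (if current_player = 1 then (1 : Int) else 0)) < res.length))

instance (board : List Int) (current_player : Int) (res : List Int) :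
    Decidable (Pre_play_helper board current_player res) := by
  unfold Pre_play_helper; infer_instance

def pvWitness_play_helper : List Int × Int × List Int := ([1, 2], 0, [0, 0])

def Spec_play_helper (board : List Int) (current_player : Int) (res : List Int) (out : List Int) : Prop := out = play_helper_alt board current_player res
instance (board : List Int) (current_player : Int) (res : List Int) (out : List Int) : Decidable (Spec_play_helper board current_player res out) := by unfold Spec_play_helper; infer_instance

-- ===== CLAIM (what is proved, stated in full; the proofs are below) =====
def Claim_equal_play_helper : Prop := ∀ (board : List Int) (current_player : Int) (res : List Int), Dom_play_helper board current_player res → Pre_play_helper board current_player res → Spec_play_helper board current_player res (play_helper board current_player res)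

-- ===== LEMMAS AND PROOFS =====

theorem currentRowA_ne {board : List Int} {row : Nat} (h : currentRowA board = some row) :
    board.getD row 0 ≠ 0 := by
  induction board generalizing row with
  | nil => simp [currentRowA] at h
  | cons x xs ih =>
    simp only [currentRowA] at h
    by_cases hx : x = 0
    · simp only [hx, ne_eq, not_true_eq_false, ite_false, if_neg, Option.map_eq_some_iff] at h
      obtain ⟨r, hr, hrr⟩ := h
      have := ih hr
      subst hrr
      simpa using this
    · simp only [hx, ne_eq, not_false_eq_true, ite_true, if_pos, Option.some.injEq] at h
      subst h
      simpa using hx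


-- pair algebra on even/odd counts (the group ring Z[Z/2])
def pmul (a b : Int × Int) : Int × Int := (a.1 * b.1 + a.2 * b.2, a.1 * b.2 + a.2 * b.1)
def pswap (a : Int × Int) : Int × Int := (a.2, a.1)

-- per-row (even, odd) chain counts
def rowP (v : Int) : Int × Int :=
  if v = 0 then (1, 0)
  else if v = 1 then (0, 1)
  else if 2 ≤ v then ((2:Int) ^ (v - 2).toNat, (2:Int) ^ (v - 2).toNat)
  else (0, 0)

-- whole-board (even, odd) leaf counts
def NP (board : List Int) : Int × Int := (board.map rowP).foldr pmul (1, 0)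

theorem pmul_one (a : Int × Int) : pmul a (1, 0) = a := by simp [pmul]
theorem pmul_assoc (a b c : Int × Int) : pmul (pmul a b) c = pmul a (pmul b c) := by
  simp only [pmul, Prod.mk.injEq]; constructor <;> ring
theorem pmul_add (a b c : Int × Int) : pmul (a + b) c = pmul a c + pmul b c := by
  simp only [pmul, Prod.fst_add, Prod.snd_add, Prod.mk_add_mk, Prod.mk.injEq]; constructor <;> ring
theorem sum_map_pswap (l : List (Int × Int)) : (l.map pswap).sum = pswap l.sum := by
  induction l with
  | nil => rfl
  | cons x xs ih =>
    simp only [List.map_cons, List.sum_cons, ih, pswap, Prod.mk_add_mk, Prod.fst_add, Prod.snd_add]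

theorem pswap_pmul (a b : Int × Int) : pswap (pmul a b) = pmul (pswap a) b := by
  simp only [pmul, pswap, Prod.mk.injEq]; constructor <;> ring

-- increment helper: res[j] += n on a Nat index, skipping out-of-range / zero
def incN (res : List Int) (j : Nat) (n : Int) : List Int :=
  if n = 0 then res else res.set j (res.getD j 0 + n)

-- add P.1 at index c and P.2 at index 1-c (c ∈ {0,1})
def addPair (res : List Int) (c : Nat) (P : Int × Int) : List Int :=
  incN (incN res (1 - c) P.2) c P.1

theorem getD_set_self (l : List Int) (i : Nat) (x : Int) (h : i < l.length) :
    (l.set i x).getD i 0 = x := by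
  simp [List.getD, h]

theorem getD_set_ne (l : List Int) (i j : Nat) (x : Int) (h : i ≠ j) :
    (l.set i x).getD j 0 = l.getD j 0 := by
  simp [List.getD, List.getElem?_set_ne h]

theorem incN_incN_same (res : List Int) (j : Nat) (a b : Int) :
    incN (incN res j a) j b = incN res j (a + b) := by
  by_cases ha : a = 0
  · simp [incN, ha]
  by_cases hb : b = 0
  · simp [incN, ha, hb]
  by_cases hj : j < res.length
  · simp only [incN, ha, hb, ite_false]
    rw [getD_set_self _ _ _ hj, List.set_set]
    by_cases hab : a + b = 0
    · simp only [hab, ite_true, if_pos]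
      have heq : res.getD j 0 + a + b = res.getD j 0 := by omega
      rw [heq, List.getD_eq_getElem _ _ hj]
      exact List.set_getElem_self ..
    · simp only [hab, ite_false, if_neg]
      ring_nf
  · have hle : res.length ≤ j := le_of_not_gt hj
    have h1 : res.set j (res.getD j 0 + a) = res := List.set_eq_of_length_le hle ..
    have hid : ∀ x : Int, incN res j x = res := by
      intro x
      unfold incN
      split
      · rfl
      · exact List.set_eq_of_length_le hle ..
    rw [hid a]
    rw [hid b, hid (a + b)]

theorem incN_comm (res : List Int) (j k : Nat) (a b : Int) (h : j ≠ k) :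
    incN (incN res j a) k b = incN (incN res k b) j a := by
  by_cases ha : a = 0
  · simp [incN, ha]
  by_cases hb : b = 0
  · simp [incN, ha, hb]
  simp only [incN, ha, hb, ite_false]
  rw [getD_set_ne _ _ _ _ h, getD_set_ne _ _ _ _ (Ne.symm h)]
  exact List.set_comm _ _ h

theorem addPair_zero (res : List Int) (c : Nat) : addPair res c (0, 0) = res := by
  simp [addPair, incN]

theorem addPair_addPair (res : List Int) (c : Nat) (hc : c ≤ 1) (P Q : Int × Int) :
    addPair (addPair res c P) c Q = addPair res c (P + Q) := by
  simp only [addPair, Prod.fst_add, Prod.snd_add]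
  rw [incN_comm _ c (1 - c) P.1 Q.2 (by omega), incN_incN_same, incN_incN_same]

theorem addPair_swap (res : List Int) (c : Nat) (hc : c ≤ 1) (Q : Int × Int) :
    addPair res (1 - c) Q = addPair res c (pswap Q) := by
  have h11 : 1 - (1 - c) = c := by omega
  simp only [addPair, pswap, h11]
  exact incN_comm _ _ _ _ _ (by omega)

-- the per-row recurrence: summing swapped counts of all moves gives the row count
theorem rowP_sum_nat : ∀ (k : Nat), 1 ≤ k →
    ((PySem.List.pyRange 0 (k : Int) 1).map (fun m => pswap (rowP m))).sum = rowP (k : Int) := by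
  intro k hk
  induction k with
  | zero => omega
  | succ n ih =>
    by_cases hn : 1 ≤ n
    · have hr : PySem.List.pyRange 0 ((n : Int) + 1) 1 =
          PySem.List.pyRange 0 (n : Int) 1 ++ [(n : Int)] :=
        PySem.List.pyRange_one_succ_right (by positivity)
      push_cast
      rw [hr, List.map_append, List.sum_append, ih hn]
      simp only [List.map_cons, List.map_nil, List.sum_cons, List.sum_nil, add_zero]
      rcases Nat.lt_or_ge n 2 with h2 | h2
      · interval_cases n
        · decide
      · have hn0 : (n : Int) ≠ 0 := by omega
        have hn1 : (n : Int) ≠ 1 := by omega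
        have hn2 : (2:Int) ≤ n := by omega
        have hs0 : ((n : Int) + 1) ≠ 0 := by omega
        have hs1 : ((n : Int) + 1) ≠ 1 := by omega
        have hs2 : (2:Int) ≤ (n : Int) + 1 := by omega
        simp only [rowP, hn0, hn1, hn2, hs0, hs1, hs2, if_neg, if_pos, ite_true, ite_false, pswap]
        have hpow : ((n : Int) + 1 - 2).toNat = ((n : Int) - 2).toNat + 1 := by omega
        rw [hpow, pow_succ]
        simp only [Prod.mk.injEq, Prod.mk_add_mk]
        constructor <;> ring
    · have hn0 : n = 0 := by omega
      subst hn0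
      have : PySem.List.pyRange 0 (1 : Int) 1 = [0] := by decide
      norm_num [this, rowP, pswap]

theorem rowP_sum (v : Int) (hv : v ≠ 0) :
    ((PySem.List.pyRange 0 v 1).map (fun m => pswap (rowP m))).sum = rowP v := by
  rcases Int.lt_or_le v 0 with hneg | hpos
  · rw [PySem.List.pyRange_one_eq_nil (by omega)]
    have h0 : v ≠ 0 := hv
    have h1 : v ≠ 1 := by omega
    have h2 : ¬ (2:Int) ≤ v := by omega
    simp [rowP, h0, h1, h2, List.sum_nil]
    rfl
  · have hk : 1 ≤ v.toNat := by omega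
    have := rowP_sum_nat v.toNat hk
    rwa [Int.toNat_of_nonneg hpos] at this

-- sum distributes out of pmul
theorem sum_map_pmul (l : List Int) (g : Int → Int × Int) (b : Int × Int) :
    (l.map (fun m => pmul (g m) b)).sum = pmul ((l.map g).sum) b := by
  induction l with
  | nil => simp only [List.map_nil, List.sum_nil, pmul]; simp [Prod.ext_iff]
  | cons x xs ih => simp [ih, pmul_add]

-- NP after setting one position factors through rowP of the new value
theorem NP_set (board : List Int) (row : Nat) (m : Int) (h : row < board.length) :
    NP (board.set row m) = pmul (rowP m) (NP (board.set row 0)) := by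
  induction board generalizing row with
  | nil => simp at h
  | cons x xs ih =>
    cases row with
    | zero =>
      simp only [List.set_cons_zero, NP, List.map_cons, List.foldr_cons]
      congr 1
      simp only [rowP, ite_true, if_pos]
      simp [pmul]
    | succ r =>
      simp only [List.set_cons_succ, NP, List.map_cons, List.foldr_cons]
      simp only [List.length_cons] at h
      have := ih r (by omega)
      simp only [NP] at this
      rw [this]
      rw [← pmul_assoc, ← pmul_assoc]
      congr 1
      simp only [pmul, Prod.mk.injEq]; constructor <;> ring

theorem set_getD_self (board : List Int) (row : Nat) (h : row < board.length) :
    board.set row (board.getD row 0) = board := by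
  rw [List.getD_eq_getElem _ _ h]
  exact List.set_getElem_self ..

-- the key counting identity: children counts (swapped) sum to the board count
theorem NP_sum (board : List Int) (row : Nat) (h : currentRowA board = some row) :
    ((PySem.List.pyRange 0 (board.getD row 0) 1).map
        (fun m => pswap (NP (board.set row m)))).sum = NP board := by
  have hlt := currentRowA_lt h
  have hne := currentRowA_ne h
  have hmap : (PySem.List.pyRange 0 (board.getD row 0) 1).map
        (fun m => pswap (NP (board.set row m)))
      = (PySem.List.pyRange 0 (board.getD row 0) 1).map
        (fun m => pmul (pswap (rowP m)) (NP (board.set row 0))) := by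
    apply List.map_congr_left
    intro m _
    rw [NP_set _ _ _ hlt, pswap_pmul]
  rw [hmap, sum_map_pmul _ (fun m => pswap (rowP m)), rowP_sum _ hne,
    ← NP_set _ _ _ hlt, set_getD_self _ _ hlt]

-- all-zero boards
theorem currentRowA_none_iff (board : List Int) :
    currentRowA board = none ↔ ∀ x ∈ board, x = 0 := by
  induction board with
  | nil => simp [currentRowA]
  | cons x xs ih =>
    simp only [currentRowA, List.mem_cons]
    by_cases hx : x = 0
    · simp only [hx, ne_eq, not_true_eq_false, ite_false, if_neg]
      simp only [Option.map_eq_none_iff] at *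
      simp [ih]
    · simp [hx]

theorem NP_allzero (board : List Int) (h : currentRowA board = none) : NP board = (1, 0) := by
  rw [currentRowA_none_iff] at h
  induction board with
  | nil => simp [NP]
  | cons x xs ih =>
    have hx : x = 0 := h x (by simp)
    simp only [NP, List.map_cons, List.foldr_cons] at *
    rw [ih (fun y hy => h y (by simp [hy])), hx]
    simp [rowP, pmul]

-- folding accumulating calls collapses to one addPair of the summed pairs
theorem foldl_addPair (c : Nat) (hc : c ≤ 1) (f : Int → List Int → List Int)
    (g : Int → Int × Int) :
    ∀ (l : List Int) (res : List Int), (∀ m ∈ l, ∀ r, f m r = addPair r c (g m)) →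
      l.foldl (fun r m => f m r) res = addPair res c ((l.map g).sum) := by
  intro l
  induction l with
  | nil => intro res _; exact (addPair_zero res c).symm
  | cons x xs ih =>
    intro res hf
    simp only [List.foldl_cons, List.map_cons, List.sum_cons]
    rw [hf x (by simp), ih _ (fun m hm => hf m (by simp [hm]))]
    rw [addPair_addPair _ _ hc]

-- main characterisation of A for player indices 0/1
theorem play_helper_char (board : List Int) (c : Nat) (res : List Int) (hc : c ≤ 1) :
    play_helper board (c : Int) res = addPair res c (NP board) := by
  induction hs : sumNatA board using Nat.strong_induction_on generalizing board c res with
  | _ n ih =>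
  subst hs
  rw [play_helper]
  split
  · next h =>
    rw [NP_allzero _ h]
    simp only [addPair, incN, one_ne_zero, ite_false, if_neg, ite_true, if_pos]
    simp [PySem.List.pySetD_natCast, PySem.List.pyGetD_natCast]
  · next row h =>
    dsimp only
    refine Eq.trans (List.foldl_attach
      (f := fun r m => play_helper (doMoveA board m) (if (c : Int) = 1 then 0 else 1) r)
      (b := res)) ?_
    have hcast : (if (c : Int) = 1 then (0:Int) else 1) = (((1 - c : Nat) : Int)) := by
      interval_cases c <;> simp
    rw [hcast]
    have hfold := foldl_addPair (1 - c) (by omega)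
      (fun m r => play_helper (doMoveA board m) ((1 - c : Nat) : Int) r)
      (fun m => NP (doMoveA board m))
      (PySem.List.pyRange 0 (board.getD row 0) 1) res ?_
    · rw [hfold]
      rw [addPair_swap _ _ hc]
      have hps : pswap (((PySem.List.pyRange 0 (board.getD row 0) 1).map
          (fun m => NP (doMoveA board m))).sum)
          = ((PySem.List.pyRange 0 (board.getD row 0) 1).map
          (fun m => pswap (NP (doMoveA board m)))).sum := by
        rw [← sum_map_pswap, List.map_map]
        all_goals exact congrArg List.sum (List.map_congr_left (fun m _ => rfl))
      rw [hps]
      have hdm : (PySem.List.pyRange 0 (board.getD row 0) 1).map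
          (fun m => pswap (NP (doMoveA board m)))
          = (PySem.List.pyRange 0 (board.getD row 0) 1).map
          (fun m => pswap (NP (board.set row m))) := by
        apply List.map_congr_left
        intro m _
        simp [doMoveA, h]
      rw [hdm, NP_sum _ _ h]
    · intro m hm r
      have hmem := (PySem.List.mem_pyRange_one).mp hm
      have hdec : sumNatA (doMoveA board m) < sumNatA board := by
        simp only [doMoveA, h]
        exact sumNatA_set_lt (currentRowA_lt h) hmem.1 hmem.2
      exact ih _ hdec _ _ _ (by omega) rfl

-- B's fold computes NP
theorem alt_fold_eq_NP (board : List Int) :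
    ∀ (a : Int × Int), board.foldl
      (fun (p : Int × Int) v =>
        if v = 0 then p
        else
          let eo : Int × Int :=
            if v = 1 then (0, 1)
            else if 2 ≤ v then ((2:Int) ^ (v - 2).toNat, (2:Int) ^ (v - 2).toNat)
            else (0, 0)
          (p.1 * eo.1 + p.2 * eo.2, p.1 * eo.2 + p.2 * eo.1)) a
    = pmul a (NP board) := by
  induction board with
  | nil => intro a; simp [NP, pmul_one]
  | cons x xs ih =>
    intro a
    simp only [List.foldl_cons, NP, List.map_cons, List.foldr_cons]
    rw [show (NP xs) = (xs.map rowP).foldr pmul (1,0) from rfl] at ih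
    by_cases hx : x = 0
    · simp only [hx, ite_true, if_pos]
      rw [ih]
      congr 1
      simp [rowP, pmul_one, pmul]
    · simp only [hx, ite_false, if_neg]
      rw [ih]
      rw [← pmul_assoc]
      congr 1
      by_cases h1 : x = 1
      · simp [h1, rowP, pmul]
      · by_cases h2 : (2:Int) ≤ x
        · simp [rowP, hx, h1, h2, pmul]
        · simp [rowP, hx, h1, h2, pmul]

-- final assembly
theorem play_eq_alt (board : List Int) (cp : Int) (res : List Int) :
    play_helper board cp res = play_helper_alt board cp res := by
  unfold play_helper_alt
  rw [alt_fold_eq_NP]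
  simp only [pmul, one_mul, zero_mul, add_zero, zero_add, mul_one, mul_zero]
  by_cases hz : ∀ x ∈ board, x = 0
  · have hnone : currentRowA board = none := (currentRowA_none_iff board).mpr hz
    have hall : board.all (fun v => v == 0) = true := by
      simp only [List.all_eq_true, beq_iff_eq]; exact hz
    rw [if_pos hall, play_helper]
    split
    · rfl
    · next row heq => rw [hnone] at heq; cases heq
  · have hall : ¬ (board.all (fun v => v == 0) = true) := by
      simp only [List.all_eq_true, beq_iff_eq]; exact hz
    rw [if_neg hall, play_helper]
    split
    · next heq => exact absurd ((currentRowA_none_iff board).mp heq) hz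
    · next row hrow =>
      dsimp only
      refine Eq.trans (List.foldl_attach
        (f := fun r m => play_helper (doMoveA board m) (if cp = 1 then 0 else 1) r)
        (b := res)) ?_
      set c : Nat := if cp = 1 then 0 else 1 with hcdef
      have hc : c ≤ 1 := by by_cases h : cp = 1 <;> simp [hcdef, h]
      have hcast : (if cp = 1 then (0:Int) else 1) = ((c : Nat) : Int) := by
        by_cases h : cp = 1 <;> simp [hcdef, h]
      rw [hcast]
      have hfold := foldl_addPair c hc
        (fun m r => play_helper (doMoveA board m) ((c : Nat) : Int) r)
        (fun m => NP (doMoveA board m))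
        (PySem.List.pyRange 0 (board.getD row 0) 1) res ?_
      · rw [hfold]
        have hswap : ((PySem.List.pyRange 0 (board.getD row 0) 1).map
            (fun m => NP (doMoveA board m))).sum = pswap (NP board) := by
          have h1 : (PySem.List.pyRange 0 (board.getD row 0) 1).map
              (fun m => NP (doMoveA board m))
              = (PySem.List.pyRange 0 (board.getD row 0) 1).map
              (fun m => NP (board.set row m)) := by
            apply List.map_congr_left; intro m _; simp [doMoveA, hrow]
          have h2 := NP_sum board row hrow
          rw [h1, ← h2, ← sum_map_pswap, List.map_map]
          all_goals exact congrArg List.sum (List.map_congr_left (fun m _ => rfl))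
        rw [hswap]
        have h1p : (1 : Int) - ((c : Nat) : Int) = (((1 - c : Nat) : Nat) : Int) := by
          interval_cases c <;> simp
        rw [h1p]
        simp only [addPair, pswap]
        have hIncEq : ∀ (r : List Int) (j : Nat) (n : Int),
            (if n ≠ 0 then PySem.List.pySetD r ((j : Nat) : Int) (PySem.List.pyGetD r ((j : Nat) : Int) 0 + n) else r) = incN r j n := by
          intro r j n
          by_cases hn : n = 0
          · simp [incN, hn]
          · simp [incN, hn, PySem.List.pySetD_natCast, PySem.List.pyGetD_natCast]
        rw [hIncEq res c (NP board).2, hIncEq _ (1 - c) (NP board).1]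
        exact (incN_comm res c (1 - c) (NP board).2 (NP board).1 (by omega)).symm
      · intro m hm r
        exact play_helper_char _ c r hc

-- ===== VERDICT (by name: the statement is the Claim_ definition above) =====
theorem play_helper_spec : Claim_equal_play_helper := by
  intro board cp res _ _
  unfold Spec_play_helper
  exact play_eq_alt board cp res
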